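-- pv_equiv track=rewrite | github.com/ashudnsingh/CodeSignal | The Core/Cliffs of Pain/156 - game2048.py | game2048
-- ===== SOURCE A (Python) =====
-- def merge(row, left_or_down):
--     i, new_row = 0, []
--     transposed = [e for e in row if e]
--
--     if not left_or_down:
--         transposed = transposed[::-1]
--
--     while i < len(transposed):
--         if i == len(transposed) - 1:
--             new_row += [transposed[i]]
--             break
--         if transposed[i] == transposed[i + 1]:
--             new_row += [2 * transposed[i]]
--             i += 2
--         else:
--             new_row += [transposed[i]]
--             i += 1
--
--     if not left_or_down:
--         new_row = [0]*(4 - len(new_row)) + new_row[::-1]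
--
--     return  new_row + [0]*(4 - len(new_row))
--
-- def game2048(grid, path):
--     for direc in path:
--
--         if direc in 'LR':
--             grid = [merge(row, direc == 'L') for row in grid]
--
--         if direc in 'UD':
--             grid = [merge(row[::-1], direc == 'D') for row in zip(*grid)]
--             grid = [row for row in zip(*grid)][::-1]
--
--     return grid
-- ===== SOURCE B (Python) =====
-- def _slide(row):
--     # single direction-agnostic left slide-and-merge: stack with a "top mergeable" flag
--     out, can = [], False
--     for x in row:
--         if x:
--             if can and out[-1] == x:
--                 out[-1] = 2 * x
--                 can = False
--             else:
--                 out.append(x)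
--                 can = True
--     return out
--
-- def _pad_r(xs):
--     return xs + [0] * (4 - len(xs))
--
-- def _pad_l(xs):
--     return [0] * (4 - len(xs)) + xs
--
-- def _cols(g):
--     return [list(c) for c in zip(*g)]
--
-- def game2048(grid, path):
--     for d in path:
--         if d == 'L':
--             grid = [_pad_r(_slide(r)) for r in grid]
--         elif d == 'R':
--             grid = [_pad_l(_slide(r[::-1])[::-1]) for r in grid]
--         elif d == 'U':
--             grid = _cols([_pad_l(_slide(c)[::-1]) for c in _cols(grid)])[::-1]
--         elif d == 'D':
--             grid = _cols([_pad_r(_slide(c[::-1])) for c in _cols(grid)])[::-1]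
--     return grid
-- ===== Notes on version B (the rewrite author's own statement) =====
-- stated objective: simpler
-- what changed: Replaces the flag-driven merge (filter, conditional double reversal, index while-loop, two padding formulas) by one direction-agnostic left slide implemented as a single pass with a stack and a merge flag, with four explicit direction branches built from reverse/pad/transpose combinators.
import Mathlib
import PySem

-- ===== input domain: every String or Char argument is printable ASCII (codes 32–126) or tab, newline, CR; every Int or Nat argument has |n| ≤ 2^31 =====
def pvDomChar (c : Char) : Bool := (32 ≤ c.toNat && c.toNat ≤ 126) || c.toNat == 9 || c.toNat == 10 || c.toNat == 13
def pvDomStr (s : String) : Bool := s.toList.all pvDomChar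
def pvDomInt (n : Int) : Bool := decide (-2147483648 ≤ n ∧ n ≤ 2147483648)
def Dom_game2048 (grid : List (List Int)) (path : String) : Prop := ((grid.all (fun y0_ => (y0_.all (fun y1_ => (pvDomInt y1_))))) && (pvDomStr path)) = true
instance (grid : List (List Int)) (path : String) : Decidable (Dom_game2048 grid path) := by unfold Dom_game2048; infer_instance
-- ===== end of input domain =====

-- B replaces the flag-driven merge (conditional double reversal + index while-loop + two
-- padding formulas) by one direction-agnostic left slide (single pass, stack + merge flag)
-- combined with reverse/pad/transpose combinators per direction: simpler decomposition, same cost.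


-- shared helper: Python's zip(*g) (transpose truncated to the shortest row); used by both
-- Pythons (A's zip(*grid), B's _cols) identically
def pvMinLen : List (List Int) → Nat
  | [] => 0
  | [r] => r.length
  | r :: rs => min r.length (pvMinLen rs)

def pyTranspose (g : List (List Int)) : List (List Int) :=
  match g with
  | [] => []
  | _ => (List.range (pvMinLen g)).map (fun i => g.map (fun r => r.getD i 0))

-- ===== PORT A =====
-- the while-loop of merge, index i over `transposed`, as the obvious structural recursion
def mergeLoop : List Int → List Int
  | [] => []
  | [a] => [a]
  | a :: b :: rest =>
      if a = b then (2 * a) :: mergeLoop rest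
      else a :: mergeLoop (b :: rest)

def merge (row : List Int) (leftOrDown : Bool) : List Int :=
  let transposed := row.filter (fun e => e ≠ 0)
  let transposed := if leftOrDown then transposed else transposed.reverse
  let newRow := mergeLoop transposed
  let newRow := if leftOrDown then newRow
                else List.replicate (4 - newRow.length) 0 ++ newRow.reverse
  newRow ++ List.replicate (4 - newRow.length) 0

def gameStepA (g : List (List Int)) (direc : Char) : List (List Int) :=
  let g1 := if direc = 'L' ∨ direc = 'R' then
              g.map (fun row => merge row (direc = 'L'))
            else g
  if direc = 'U' ∨ direc = 'D' then
    let m := (pyTranspose g1).map (fun row => merge row.reverse (direc = 'D'))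
    (pyTranspose m).reverse
  else g1

def game2048 (grid : List (List Int)) (path : String) : List (List Int) :=
  path.toList.foldl gameStepA grid

-- ===== PORT B =====
-- one step of B's _slide: state (out, can-merge-with-top flag)
def slideStep (s : List Int × Bool) (x : Int) : List Int × Bool :=
  if x ≠ 0 then
    if s.2 ∧ s.1.getLast? = some x then (s.1.dropLast ++ [2 * x], false)
    else (s.1 ++ [x], true)
  else s

def slide (row : List Int) : List Int :=
  (row.foldl slideStep ([], false)).1

def padR (xs : List Int) : List Int := xs ++ List.replicate (4 - xs.length) 0
def padL (xs : List Int) : List Int := List.replicate (4 - xs.length) 0 ++ xs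

def gameStepB (g : List (List Int)) (d : Char) : List (List Int) :=
  if d = 'L' then g.map (fun r => padR (slide r))
  else if d = 'R' then g.map (fun r => padL (slide r.reverse).reverse)
  else if d = 'U' then (pyTranspose ((pyTranspose g).map (fun c => padL (slide c).reverse))).reverse
  else if d = 'D' then (pyTranspose ((pyTranspose g).map (fun c => padR (slide c.reverse)))).reverse
  else g

def game2048_alt (grid : List (List Int)) (path : String) : List (List Int) :=
  path.toList.foldl gameStepB grid

-- ===== PRECONDITION & SPEC =====
def Spec_game2048 (grid : List (List Int)) (path : String) (out : List (List Int)) : Prop := out = game2048_alt grid path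
instance (grid : List (List Int)) (path : String) (out : List (List Int)) : Decidable (Spec_game2048 grid path out) := by unfold Spec_game2048; infer_instance

-- ===== CLAIM (what is proved, stated in full; the proofs are below) =====
def Claim_equal_game2048 : Prop := ∀ (grid : List (List Int)) (path : String), Dom_game2048 grid path → Spec_game2048 grid path (game2048 grid path)

-- ===== LEMMAS AND PROOFS =====

-- the stack-with-flag fold computes mergeLoop of the nonzero elements
theorem slide_invariant (t : List Int) :
    (∀ acc : List Int,
        (t.foldl slideStep (acc, false)).1 = acc ++ mergeLoop (t.filter (fun e => e ≠ 0)))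
    ∧ (∀ (a : Int) (acc : List Int), a ≠ 0 →
        (t.foldl slideStep (acc ++ [a], true)).1
          = acc ++ mergeLoop (a :: t.filter (fun e => e ≠ 0))) := by
  induction t with
  | nil => constructor <;> intros <;> simp [mergeLoop]
  | cons x t ih =>
    constructor
    · intro acc
      by_cases hx : x = 0
      · subst hx
        simpa [slideStep] using ih.1 acc
      · have := ih.2 x acc hx
        simp [slideStep, hx] at this ⊢
        exact this
    · intro a acc ha
      by_cases hx : x = 0
      · subst hx
        simpa [slideStep] using ih.2 a acc ha
      · by_cases hax : x = a
        · subst hax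
          have := ih.1 (acc ++ [2 * x])
          simp [slideStep, hx, mergeLoop] at this ⊢
          exact this
        · have := ih.2 x (acc ++ [a]) hx
          simp [slideStep, hx, mergeLoop, Ne.symm hax] at this ⊢
          exact this

theorem slide_eq (row : List Int) :
    slide row = mergeLoop (row.filter (fun e => e ≠ 0)) := by
  simpa using (slide_invariant row).1 []

theorem merge_true (row : List Int) : merge row true = padR (slide row) := by
  simp [merge, padR, slide_eq]

theorem padfix (xs : List Int) :
    (List.replicate (4 - xs.length) (0:Int) ++ xs.reverse)
      ++ List.replicate (4 - (List.replicate (4 - xs.length) (0:Int) ++ xs.reverse).length) 0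
    = List.replicate (4 - xs.length) 0 ++ xs.reverse := by
  have h : 4 - (List.replicate (4 - xs.length) (0:Int) ++ xs.reverse).length = 0 := by
    simp only [List.length_append, List.length_replicate, List.length_reverse]
    omega
  rw [h]
  simp

theorem merge_false (row : List Int) :
    merge row false = padL (slide row.reverse).reverse := by
  simp only [merge, padL, slide_eq, List.filter_reverse, Bool.false_eq_true,
    if_false, List.length_reverse]
  exact padfix _

theorem merge_rev_false (row : List Int) :
    merge row.reverse false = padL (slide row).reverse := by
  rw [merge_false, List.reverse_reverse]

theorem step_eq (g : List (List Int)) (d : Char) : gameStepA g d = gameStepB g d := by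
  by_cases hL : d = 'L'
  · subst hL
    simp [gameStepA, gameStepB, merge_true]
  · by_cases hR : d = 'R'
    · subst hR
      simp [gameStepA, gameStepB, merge_false]
    · by_cases hU : d = 'U'
      · subst hU
        simp [gameStepA, gameStepB, merge_rev_false]
      · by_cases hD : d = 'D'
        · subst hD
          simp [gameStepA, gameStepB, merge_true]
        · simp [gameStepA, gameStepB, hL, hR, hU, hD]

theorem foldl_steps_eq (l : List Char) (g : List (List Int)) :
    l.foldl gameStepA g = l.foldl gameStepB g := by
  induction l generalizing g with
  | nil => rfl
  | cons d ds ih => simp only [List.foldl_cons, step_eq]; exact ih _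

-- ===== VERDICT (by name: the statement is the Claim_ definition above) =====
theorem game2048_spec : Claim_equal_game2048 := by
  intro grid path _
  exact foldl_steps_eq _ grid
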